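-- pv_equiv track=rewrite | github.com/hulkima/RealHNS | RealHNS.py | generate_user_sample
-- ===== SOURCE A (Python) =====
-- def generate_user_sample(usernum,user_train_target):
--     cold_user_list = {}
--     max_len = 0
-- #     ipdb.set_trace()
--     for k,v in user_train_target.items():
--         max_len = max(max_len,len(v))
--
--     for i in range(0,max_len+1):
--         cold_user_list.update({i:[]})
--
--     for k,v in user_train_target.items():
--         item_list = cold_user_list[len(v)]
--         item_list.append(k)
--         cold_user_list.update({len(v):item_list})
-- #     ipdb.set_trace()
--
--     return cold_user_list
-- ===== SOURCE B (Python) =====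
-- def generate_user_sample(usernum, user_train_target):
--     # Simpler: one max, then a dict comprehension that rescans users once per bucket
--     # (instead of A's preallocate-then-append single pass). Same result, keys 0..max_len.
--     max_len = max(map(len, user_train_target.values()), default=0)
--     return {i: [k for k, v in user_train_target.items() if len(v) == i]
--             for i in range(max_len + 1)}
-- ===== Notes on version B (the rewrite author's own statement) =====
-- stated objective: simpler
-- what changed: Replaced A's three sequential loops (running max, bucket preallocation, append-into-bucket with dict re-update) by one max with default and a dict comprehension over lengths 0..max_len that filters the users for each bucket.
import Mathlib
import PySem

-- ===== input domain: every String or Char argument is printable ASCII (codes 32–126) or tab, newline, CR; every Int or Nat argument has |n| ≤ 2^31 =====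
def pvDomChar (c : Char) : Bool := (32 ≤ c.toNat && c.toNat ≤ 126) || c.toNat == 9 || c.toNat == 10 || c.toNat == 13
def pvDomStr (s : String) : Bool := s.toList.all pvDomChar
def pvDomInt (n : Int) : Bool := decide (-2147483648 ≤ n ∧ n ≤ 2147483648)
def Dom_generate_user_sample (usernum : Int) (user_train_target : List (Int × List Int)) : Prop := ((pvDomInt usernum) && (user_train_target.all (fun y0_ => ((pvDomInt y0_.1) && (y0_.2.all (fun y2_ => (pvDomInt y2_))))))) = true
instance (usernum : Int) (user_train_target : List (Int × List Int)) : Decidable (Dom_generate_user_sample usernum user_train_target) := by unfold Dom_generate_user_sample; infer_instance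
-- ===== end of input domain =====

-- B replaces A's three loops by one max-with-default plus a per-length filter comprehension (simpler; equal return value).


-- ===== PORT A =====
-- The lookup cold_user_list[len(v)] in A's third loop always hits an existing key (len v ≤ max_len),
-- so the get-then-reinsert is ported as Dict.modify with default [] (the default branch is unreachable).
def generate_user_sample (usernum : Int) (user_train_target : List (Int × List Int)) : List (Int × List Int) :=
  let max_len : Int := user_train_target.foldl (fun m kv => max m (kv.2.length : Int)) 0
  let d0 : PySem.Dict Int (List Int) :=
    (PySem.List.pyRange 0 (max_len + 1)).foldl (fun d i => d.insert i ([] : List Int)) PySem.Dict.empty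
  let d : PySem.Dict Int (List Int) :=
    user_train_target.foldl (fun d kv => d.modify ((kv.2.length : Int)) [] (· ++ [kv.1])) d0
  d.items

-- ===== PORT B =====
def generate_user_sample_alt (usernum : Int) (user_train_target : List (Int × List Int)) : List (Int × List Int) :=
  let max_len : Int :=
    PySem.List.maxD (user_train_target.map (fun kv => (kv.2.length : Int))) (fun x => x) 0
  (PySem.List.pyRange 0 (max_len + 1)).map
    (fun i => (i, (user_train_target.filter (fun kv => (kv.2.length : Int) == i)).map (·.1)))

-- ===== PRECONDITION & SPEC =====
def Spec_generate_user_sample (usernum : Int) (user_train_target : List (Int × List Int)) (out : List (Int × List Int)) : Prop := out = generate_user_sample_alt usernum user_train_target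
instance (usernum : Int) (user_train_target : List (Int × List Int)) (out : List (Int × List Int)) : Decidable (Spec_generate_user_sample usernum user_train_target out) := by unfold Spec_generate_user_sample; infer_instance

-- ===== CLAIM (what is proved, stated in full; the proofs are below) =====
def Claim_equal_generate_user_sample : Prop := ∀ (usernum : Int) (user_train_target : List (Int × List Int)), Dom_generate_user_sample usernum user_train_target → Spec_generate_user_sample usernum user_train_target (generate_user_sample usernum user_train_target)

-- ===== LEMMAS AND PROOFS =====

-- A's running max (from 0) equals B's max-with-default-0 of the mapped lengths.
lemma maxlen_eq (us : List (Int × List Int)) :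
    us.foldl (fun m kv => max m (kv.2.length : Int)) 0
      = PySem.List.maxD (us.map (fun kv => (kv.2.length : Int))) (fun x => x) 0 := by
  cases us with
  | nil => rfl
  | cons p t =>
    simp only [PySem.List.maxD, List.map_cons, PySem.List.max?_id_cons, Option.getD_some,
      List.foldl_cons, List.foldl_map]
    rw [max_eq_right (Int.natCast_nonneg _)]

theorem generate_user_sample_spec : Claim_equal_generate_user_sample := by
  intro usernum us _
  unfold Spec_generate_user_sample generate_user_sample generate_user_sample_alt
  rw [← maxlen_eq us]
  set n : Int := us.foldl (fun m kv => max m (kv.2.length : Int)) 0 with hn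
  have hn0 : 0 ≤ n := (PySem.List.le_foldl_max_int us (fun kv => (kv.2.length : Int)) 0).1
  have hbound : ∀ kv ∈ us, (kv.2.length : Int) ≤ n :=
    (PySem.List.le_foldl_max_int us (fun kv => (kv.2.length : Int)) 0).2
  -- the preallocation loop: fresh distinct keys, so items are just the range with empty buckets
  have hR : (PySem.List.pyRange 0 (n + 1)).Nodup := PySem.List.nodup_pyRange_one 0 (n + 1)
  have hitems0 :
      ((PySem.List.pyRange 0 (n + 1)).foldl (fun d i => d.insert i ([] : List Int))
          PySem.Dict.empty).items
        = (PySem.List.pyRange 0 (n + 1)).map (fun i => (i, ([] : List Int))) := by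
    have := PySem.Dict.items_foldl_insert_fresh (l := PySem.List.pyRange 0 (n + 1))
      (k := fun i => i) (v := fun _ => ([] : List Int)) (d := PySem.Dict.empty)
      (by intro a _; exact PySem.Dict.contains_empty a) (by simpa using hR)
    simpa using this
  set d0 : PySem.Dict Int (List Int) :=
    (PySem.List.pyRange 0 (n + 1)).foldl (fun d i => d.insert i ([] : List Int))
      PySem.Dict.empty with hd0
  have hkeys0 : d0.keys = PySem.List.pyRange 0 (n + 1) := by
    show d0.items.map (·.1) = _
    rw [hitems0]; simp [Function.comp_def]
  have hnodup0 : d0.keys.Nodup := by rw [hkeys0]; exact hR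
  set dF : PySem.Dict Int (List Int) :=
    us.foldl (fun d kv => d.modify ((kv.2.length : Int)) [] (· ++ [kv.1])) d0 with hdF
  -- the append loop never creates a key: every len v is already in the range
  have hmemR : ∀ kv ∈ us, (kv.2.length : Int) ∈ PySem.List.pyRange 0 (n + 1) := by
    intro kv hkv
    rw [PySem.List.mem_pyRange_one]
    exact ⟨by positivity, by have := hbound kv hkv; omega⟩
  have hkeysF : dF.keys = d0.keys := by
    rw [hdF, PySem.Dict.keys_foldl_modify_key]
    have : ∀ l : List (Int × List Int), (∀ kv ∈ l, (kv.2.length : Int) ∈ d0.keys) →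
        PySem.Set.update d0.keys (l.map (fun kv => (kv.2.length : Int))) = d0.keys := by
      intro l
      induction l with
      | nil => intro _; rfl
      | cons p t ih =>
        intro h
        simp only [List.map_cons, PySem.Set.update, List.foldl_cons]
        have hp : PySem.Set.add d0.keys ((p.2.length : Int)) = d0.keys := by
          simp [PySem.Set.add, PySem.Set.contains, h p (by simp)]
        rw [hp]; exact ih (fun kv hkv => h kv (by simp [hkv]))
    exact this us (fun kv hkv => by rw [hkeys0]; exact hmemR kv hkv)
  have hnodupF : dF.keys.Nodup := hkeysF ▸ hnodup0
  -- read the final dict off its keys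
  rw [PySem.Dict.items_eq_map_keys dF hnodupF ([] : List Int), hkeysF, hkeys0]
  apply List.map_congr_left
  intro i hiR
  have hgetD0 : d0.getD i [] = [] := by
    exact PySem.Dict.getD_of_mem_items d0
      (by rw [hitems0]; exact List.mem_map.2 ⟨i, hiR, rfl⟩) hnodup0 []
  have hloop : dF.getD i []
      = d0.getD i []
        ++ ((us.map (fun kv => ((kv.2.length : Int), kv.1))).filter
              (fun p => p.1 == i)).map (·.2) := by
    have hmap := List.foldl_map (f := fun kv : Int × List Int => ((kv.2.length : Int), kv.1))
      (g := fun (d : PySem.Dict Int (List Int)) (p : Int × Int) => d.modify p.1 [] (· ++ [p.2]))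
      (l := us) (init := d0)
    rw [hdF, ← hmap]
    exact PySem.Dict.getD_foldl_modify_append ..
  rw [hloop, hgetD0, List.nil_append, List.filter_map, List.map_map]
  simp [Function.comp_def]
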